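-- pv_equiv track=rewrite | github.com/AzusaChino/little_code | src/array/binary_search.py | a_bisect_right
-- ===== SOURCE A (Python) =====
-- def a_bisect_right(arr, t) -> int:
--     l, r = 0, len(arr)
--     while l < r:
--         m = l + (r - l) // 2
--         if arr[m] > t:
--             r = m
--         else:
--             l = m + 1
--     return l
-- ===== SOURCE B (Python) =====
-- def a_bisect_right(arr, t) -> int:
--     # Recursive divide-and-conquer on sub-arrays instead of an index loop.
--     if not arr:
--         return 0
--     m = len(arr) // 2
--     if arr[m] > t:
--         return a_bisect_right(arr[:m], t)
--     return m + 1 + a_bisect_right(arr[m + 1:], t)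
-- ===== Notes on version B (the rewrite author's own statement) =====
-- stated objective: alternative
-- what changed: Replaced the iterative two-pointer while loop over indices by a recursive divide-and-conquer that slices the array and recurses on one half, returning an offset-adjusted position.
import Mathlib
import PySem

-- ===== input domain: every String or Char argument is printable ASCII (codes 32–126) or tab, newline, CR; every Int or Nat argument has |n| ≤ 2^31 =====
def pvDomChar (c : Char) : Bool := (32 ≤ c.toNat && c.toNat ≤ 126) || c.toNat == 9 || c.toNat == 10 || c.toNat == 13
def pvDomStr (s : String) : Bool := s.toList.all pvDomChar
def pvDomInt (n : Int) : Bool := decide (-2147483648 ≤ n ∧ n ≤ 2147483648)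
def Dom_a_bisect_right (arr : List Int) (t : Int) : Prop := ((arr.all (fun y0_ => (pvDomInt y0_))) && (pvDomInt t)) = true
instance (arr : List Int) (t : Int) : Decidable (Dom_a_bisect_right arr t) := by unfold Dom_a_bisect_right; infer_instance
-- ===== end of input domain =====

-- B replaces A's iterative two-pointer loop by recursion on sliced halves; same value everywhere (alternative decomposition, not faster).

-- ===== PORT A =====
-- while l < r: m = l + (r-l)//2; if arr[m] > t: r = m else: l = m+1
-- arr[m] ported via pyGet?; .getD 0 is never used: the loop maintains 0 ≤ l ≤ m < r ≤ len arr, so the index is in range.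
def aLoopA (arr : List Int) (t : Int) (l r : Int) : Int :=
  if _h : l < r then
    let m := l + PySem.Int.floordiv (r - l) 2
    if (PySem.List.pyGet? arr m).getD 0 > t then
      aLoopA arr t l m
    else
      aLoopA arr t (m + 1) r
  else l
termination_by (r - l).toNat
decreasing_by
  · have := PySem.Int.floordiv_eq_ediv_of_pos (a := r - l) (by omega : (0:Int) < 2)
    omega
  · have := PySem.Int.floordiv_eq_ediv_of_pos (a := r - l) (by omega : (0:Int) < 2)
    omega

def a_bisect_right (arr : List Int) (t : Int) : Int :=
  aLoopA arr t 0 arr.length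

-- ===== PORT B =====
-- if not arr: 0; m = len//2; if arr[m] > t: rec(arr[:m]) else m+1+rec(arr[m+1:])
def a_bisect_right_alt (arr : List Int) (t : Int) : Int :=
  match arr with
  | [] => 0
  | x :: xs =>
    let m : Nat := (x :: xs).length / 2
    if PySem.List.pyGetD (x :: xs) (m : Int) 0 > t then
      a_bisect_right_alt (PySem.List.slice (x :: xs) none (some (m : Int))) t
    else
      (m : Int) + 1 + a_bisect_right_alt (PySem.List.slice (x :: xs) (some ((m : Int) + 1)) none) t
termination_by arr.length
decreasing_by
  · rw [PySem.List.slice_to_natCast, List.length_take]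
    simp only [List.length_cons]
    omega
  · rw [show ((m : Int) + 1) = (((m + 1 : Nat)) : Int) by push_cast; ring,
        PySem.List.slice_from_natCast, List.length_drop]
    simp only [List.length_cons]
    omega

-- ===== PRECONDITION & SPEC =====
def Spec_a_bisect_right (arr : List Int) (t : Int) (out : Int) : Prop := out = a_bisect_right_alt arr t
instance (arr : List Int) (t : Int) (out : Int) : Decidable (Spec_a_bisect_right arr t out) := by unfold Spec_a_bisect_right; infer_instance

-- ===== CLAIM (what is proved, stated in full; the proofs are below) =====
def Claim_equal_a_bisect_right : Prop := ∀ (arr : List Int) (t : Int), Dom_a_bisect_right arr t → Spec_a_bisect_right arr t (a_bisect_right arr t)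

-- ===== LEMMAS AND PROOFS =====

-- unfolding of B's port on a nonempty list, with the slices rewritten as take/drop
lemma alt_ne (arr : List Int) (t : Int) (h : arr ≠ []) :
    a_bisect_right_alt arr t =
      if arr[arr.length / 2]'(by cases arr with | nil => simp at h | cons x xs => simp; omega) > t then
        a_bisect_right_alt (arr.take (arr.length / 2)) t
      else ((arr.length / 2 : Nat) : Int) + 1 + a_bisect_right_alt (arr.drop (arr.length / 2 + 1)) t := by
  match arr with
  | x :: xs =>
    rw [a_bisect_right_alt]
    have hm : (x :: xs).length / 2 < (x :: xs).length := by simp; omega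
    have hget : PySem.List.pyGetD (x :: xs) (((x :: xs).length / 2 : Nat) : Int) 0
        = (x :: xs)[(x :: xs).length / 2] := by
      rw [PySem.List.pyGetD_natCast, List.getD_eq_getElem?_getD, List.getElem?_eq_getElem hm]
      rfl
    have hsl1 : PySem.List.slice (x :: xs) none (some (((x :: xs).length / 2 : Nat) : Int))
        = (x :: xs).take ((x :: xs).length / 2) := PySem.List.slice_to_natCast ..
    have hsl2 : PySem.List.slice (x :: xs) (some ((((x :: xs).length / 2 : Nat) : Int) + 1)) none
        = (x :: xs).drop ((x :: xs).length / 2 + 1) := by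
      rw [show ((((x :: xs).length / 2 : Nat) : Int) + 1) = (((x :: xs).length / 2 + 1 : Nat) : Int) by push_cast; ring]
      exact PySem.List.slice_from_natCast ..
    simp only [hget, hsl1, hsl2]

lemma key (t : Int) : ∀ n l : Nat, ∀ arr : List Int, l + n ≤ arr.length →
    aLoopA arr t (l : Int) ((l : Int) + (n : Int)) = (l : Int) + a_bisect_right_alt ((arr.drop l).take n) t := by
  intro n
  induction n using Nat.strong_induction_on with
  | _ n ih =>
    intro l arr hlen
    rcases Nat.eq_zero_or_pos n with hn | hn
    · subst hn
      rw [aLoopA, dif_neg (by omega)]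
      simp [a_bisect_right_alt]
    · -- the midpoint
      have hidx : l + n / 2 < arr.length := by omega
      have hm : (l : Int) + PySem.Int.floordiv (((l : Int) + (n : Int)) - l) 2 = ((l + n / 2 : Nat) : Int) := by
        rw [PySem.Int.floordiv_eq_ediv_of_pos (by omega : (0:Int) < 2)]
        push_cast
        omega
      have hget : (PySem.List.pyGet? arr ((l + n / 2 : Nat) : Int)).getD 0 = arr[l + n / 2] := by
        rw [PySem.List.pyGet?_natCast, List.getElem?_eq_getElem hidx]
        rfl
      set sub := (arr.drop l).take n with hsub
      have hsublen : sub.length = n := by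
        simp [hsub]
        omega
      have hsubne : sub ≠ [] := by
        intro hc
        rw [hc] at hsublen
        simp at hsublen
        omega
      have hsubget : sub[sub.length / 2]'(by omega) = arr[l + n / 2] := by
        have ha : sub[sub.length / 2]? = some (sub[sub.length / 2]'(by omega)) :=
          List.getElem?_eq_getElem (by omega)
        have hb : sub[sub.length / 2]? = some arr[l + n / 2] := by
          rw [hsublen, hsub, List.getElem?_take_of_lt (by omega), List.getElem?_drop]
          exact List.getElem?_eq_getElem hidx
        rw [ha] at hb
        exact Option.some.inj hb
      rw [aLoopA, dif_pos (by omega : (l : Int) < (l : Int) + (n : Int))]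
      rw [alt_ne sub t hsubne, hsubget, hsublen]
      simp only [hm, hget]
      by_cases hcmp : arr[l + n / 2] > t
      · rw [if_pos hcmp, if_pos hcmp]
        have := ih (n / 2) (by omega) l arr (by omega)
        rw [show ((l + n / 2 : Nat) : Int) = (l : Int) + ((n / 2 : Nat) : Int) by push_cast; ring] at *
        rw [this]
        congr 2
        rw [hsub, List.take_take]
        congr 1
        omega
      · rw [if_neg hcmp, if_neg hcmp]
        have := ih (n - n / 2 - 1) (by omega) (l + n / 2 + 1) arr (by omega)
        rw [show ((l + n / 2 : Nat) : Int) + 1 = ((l + n / 2 + 1 : Nat) : Int) by push_cast; ring]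
        rw [show (l : Int) + (n : Int) = ((l + n / 2 + 1 : Nat) : Int) + ((n - n / 2 - 1 : Nat) : Int) by push_cast; omega]
        rw [this]
        have hdrop : (arr.drop (l + n / 2 + 1)).take (n - n / 2 - 1) = sub.drop (n / 2 + 1) := by
          rw [hsub, List.drop_take, List.drop_drop,
            show n - (n / 2 + 1) = n - n / 2 - 1 from by omega,
            show l + (n / 2 + 1) = l + n / 2 + 1 from by omega]
        rw [hdrop]
        push_cast
        ring

theorem equal_aux (arr : List Int) (t : Int) : a_bisect_right arr t = a_bisect_right_alt arr t := by
  have h := key t arr.length 0 arr (by omega)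
  simpa [a_bisect_right] using h

-- ===== VERDICT (by name: the statement is the Claim_ definition above) =====
theorem a_bisect_right_spec : Claim_equal_a_bisect_right := by
  intro arr t _
  unfold Spec_a_bisect_right
  exact equal_aux arr t
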